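-- pv_equiv track=rewrite | github.com/nordemja/AdventOfCode2019 | Day4.py | meetRequirements
-- ===== SOURCE A (Python) =====
-- def isInOrder(lst):
--
--     '''
--     FUNCTION_NAME = isInOrder
--
--     ARGUMENTS = lst
--
--     DESCRIPTION =
--
--     '''
--
--     previous = lst[0]
--
--     for num in lst:
--         if num < previous:
--             return False
--         previous = num
--     return True
--
-- def twoConesecutiveEqualValues(lst):
--     for i in range(len(lst) - 1):
--         if lst[i] == lst[i+1]:
--             return True
--     return False
--
-- def meetRequirements(lst):
--     fitsRequirements = 0
--     for each in lst:
--         for x in range(len(each)-1):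
--             if twoConesecutiveEqualValues(each) == True and isInOrder(each) == True:
--                 fitsRequirements += 1
--                 break
--
--     return fitsRequirements
-- ===== SOURCE B (Python) =====
-- def meetRequirements(lst):
--     return sum(
--         1
--         for s in lst
--         if any(a == b for a, b in zip(s, s[1:])) and list(s) == sorted(s)
--     )
-- ===== Notes on version B (the rewrite author's own statement) =====
-- stated objective: idiomatic
-- what changed: Replaces A's redundant inner index loop with break, the index-based adjacent-equality scan and the hand-written order scan by a single comprehension counting lists that have an adjacent repeat (any over zip(s, s[1:])) and equal their sorted copy (list(s) == sorted(s)).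
import Mathlib
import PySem

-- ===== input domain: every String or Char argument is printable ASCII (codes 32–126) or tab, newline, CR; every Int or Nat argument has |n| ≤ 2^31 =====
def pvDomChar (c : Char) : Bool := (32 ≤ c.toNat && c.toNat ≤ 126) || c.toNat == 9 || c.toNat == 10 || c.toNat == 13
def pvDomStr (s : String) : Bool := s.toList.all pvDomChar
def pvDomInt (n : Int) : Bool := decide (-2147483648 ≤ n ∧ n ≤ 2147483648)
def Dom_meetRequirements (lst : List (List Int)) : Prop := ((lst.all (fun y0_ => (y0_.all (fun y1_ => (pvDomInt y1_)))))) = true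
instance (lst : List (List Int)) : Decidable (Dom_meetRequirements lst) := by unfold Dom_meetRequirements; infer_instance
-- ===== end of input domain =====

-- B replaces A's index loops (redundant break loop, index scans) by an idiomatic
-- single-pass count using zip-adjacent-equality and list(s) == sorted(s).

-- ===== PORT A =====
-- isInOrder: previous = lst[0]; for num in lst: … (inside meetRequirements it is
-- only reached on lists of length ≥ 2, so headD 0 is exact there)
def isInOrderLoop : List Int → Int → Bool
  | [], _ => true
  | num :: rest, prev => if num < prev then false else isInOrderLoop rest num

def isInOrderA (lst : List Int) : Bool := isInOrderLoop lst (lst.headD 0)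

-- twoConesecutiveEqualValues: for i in range(len(lst)-1): if lst[i] == lst[i+1]: return True
def twoConsLoop (lst : List Int) : List Int → Bool
  | [] => false
  | i :: rest =>
    if PySem.List.pyGetD lst i 0 == PySem.List.pyGetD lst (i + 1) 0 then true
    else twoConsLoop lst rest

def twoConsA (lst : List Int) : Bool :=
  twoConsLoop lst (PySem.List.pyRange 0 ((lst.length : Int) - 1) 1)

-- inner 'for x in range(len(each)-1): if … : fits += 1; break'
def innerA (each : List Int) : List Int → Int → Int
  | [], acc => acc
  | _ :: rest, acc =>
    if twoConsA each == true && isInOrderA each == true then acc + 1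
    else innerA each rest acc

def meetRequirements (lst : List (List Int)) : Int :=
  lst.foldl (fun acc each =>
    innerA each (PySem.List.pyRange 0 ((each.length : Int) - 1) 1) acc) 0

-- ===== PORT B =====
def hasAdjRepeatB (s : List Int) : Bool :=
  (s.zip (PySem.List.slice s (some 1) none)).any (fun p => p.1 == p.2)

def meetRequirements_alt (lst : List (List Int)) : Int :=
  lst.foldl (fun acc s =>
    if hasAdjRepeatB s && s == PySem.List.sorted s (fun x => x) false then acc + 1
    else acc) 0

-- ===== PRECONDITION & SPEC =====
def Spec_meetRequirements (lst : List (List Int)) (out : Int) : Prop := out = meetRequirements_alt lst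
instance (lst : List (List Int)) (out : Int) : Decidable (Spec_meetRequirements lst out) := by unfold Spec_meetRequirements; infer_instance

-- ===== CLAIM (what is proved, stated in full; the proofs are below) =====
def Claim_equal_meetRequirements : Prop := ∀ (lst : List (List Int)), Dom_meetRequirements lst → Spec_meetRequirements lst (meetRequirements lst)

-- ===== LEMMAS AND PROOFS =====

-- A's inner loop checks the same condition each iteration and breaks on success.
lemma innerA_eq (each : List Int) (r : List Int) (acc : Int) :
    innerA each r acc =
      if r ≠ [] ∧ twoConsA each = true ∧ isInOrderA each = true then acc + 1 else acc := by
  induction r with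
  | nil => simp [innerA]
  | cons i rest ih =>
    by_cases h2 : twoConsA each = true
    · by_cases h3 : isInOrderA each = true
      · simp [innerA, h2, h3]
      · simp [innerA, h2, h3, ih]
    · simp [innerA, h2, ih]

lemma twoConsLoop_any (lst r : List Int) :
    twoConsLoop lst r =
      r.any (fun i => PySem.List.pyGetD lst i 0 == PySem.List.pyGetD lst (i + 1) 0) := by
  induction r with
  | nil => rfl
  | cons i rest ih =>
    by_cases h : PySem.List.pyGetD lst i 0 == PySem.List.pyGetD lst (i + 1) 0
    · simp [twoConsLoop, h]
    · simp [twoConsLoop, h, ih]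

lemma hasAdjRepeatB_eq (s : List Int) :
    hasAdjRepeatB s = (s.zip s.tail).any (fun p => p.1 == p.2) := by
  rw [hasAdjRepeatB, PySem.List.slice_from_one]

lemma twoConsA_eq_hasAdj (s : List Int) : twoConsA s = hasAdjRepeatB s := by
  rw [twoConsA, twoConsLoop_any]
  rw [hasAdjRepeatB_eq]
  rcases s with _ | ⟨a, t⟩
  · simp [PySem.List.pyRange]
  · -- length ≥ 1: the bound (len : Int) - 1 is the Nat cast of t.length
    have hb : ((a :: t).length : Int) - 1 = ((t.length : Nat) : Int) := by
      simp only [List.length_cons]; push_cast; ring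
    rw [hb, Bool.eq_iff_iff]
    simp only [List.any_eq_true, beq_iff_eq, List.tail_cons]
    constructor
    · rintro ⟨i, hi, he⟩
      rw [PySem.List.mem_pyRange_one] at hi
      obtain ⟨hi0, hilt⟩ := hi
      lift i to Nat using hi0 with k
      have hk : k < t.length := by exact_mod_cast hilt
      refine ⟨((a :: t)[k], (a :: t)[k + 1]), ?_, ?_⟩
      · rw [List.mem_iff_getElem]
        refine ⟨k, by simp [hk], ?_⟩
        simp [List.getElem_zip]
      · have h1 : PySem.List.pyGetD (a :: t) (k : Int) 0 = (a :: t)[k] := by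
          rw [PySem.List.pyGetD_natCast]
          exact List.getD_eq_getElem _ _ (by simp; omega)
        have h2 : PySem.List.pyGetD (a :: t) ((k : Int) + 1) 0 = (a :: t)[k + 1] := by
          have : ((k : Int) + 1) = ((k + 1 : Nat) : Int) := by push_cast; ring
          rw [this, PySem.List.pyGetD_natCast]
          exact List.getD_eq_getElem _ _ (by simp; omega)
        simpa [h1, h2] using he
    · rintro ⟨p, hp, he⟩
      rw [List.mem_iff_getElem] at hp
      obtain ⟨k, hk, hpk⟩ := hp
      have hkt : k < t.length := by simpa using hk
      refine ⟨(k : Int), ?_, ?_⟩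
      · rw [PySem.List.mem_pyRange_one]
        constructor
        · exact_mod_cast Nat.zero_le k
        · exact_mod_cast hkt
      · have h1 : PySem.List.pyGetD (a :: t) (k : Int) 0 = (a :: t)[k] := by
          rw [PySem.List.pyGetD_natCast]
          exact List.getD_eq_getElem _ _ (by simp; omega)
        have h2 : PySem.List.pyGetD (a :: t) ((k : Int) + 1) 0 = (a :: t)[k + 1] := by
          have : ((k : Int) + 1) = ((k + 1 : Nat) : Int) := by push_cast; ring
          rw [this, PySem.List.pyGetD_natCast]
          exact List.getD_eq_getElem _ _ (by simp; omega)
        subst hpk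
        simp only [List.getElem_zip] at he
        simp [h1, h2, he]

lemma isInOrderLoop_iff (l : List Int) (prev : Int) :
    isInOrderLoop l prev = true ↔ List.IsChain (fun a b => a ≤ b) (prev :: l) := by
  induction l generalizing prev with
  | nil => simp [isInOrderLoop]
  | cons num rest ih =>
    by_cases h : num < prev
    · simp only [isInOrderLoop, if_pos h, List.isChain_cons_cons]
      constructor
      · intro hfalse; cases hfalse
      · rintro ⟨hle, -⟩; omega
    · simp only [isInOrderLoop, if_neg h, ih, List.isChain_cons_cons]
      constructor
      · intro hc; exact ⟨by omega, hc⟩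
      · rintro ⟨-, hc⟩; exact hc

lemma isInOrderA_eq_sorted (s : List Int) :
    isInOrderA s = (s == PySem.List.sorted s (fun x => x) false) := by
  have hpair : (s == PySem.List.sorted s (fun x => x) false) =
      decide (s.Pairwise (fun a b => a ≤ b)) := by
    rcases Bool.eq_false_or_eq_true (decide (s.Pairwise (fun a b => a ≤ b))) with h | h
    · rw [h]
      rw [PySem.List.sorted_eq_self_of_pairwise s (fun x => x)
        (by simpa using of_decide_eq_true h)]
      simp
    · rw [h]
      have h' := of_decide_eq_false h
      rw [beq_eq_false_iff_ne]
      intro heq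
      exact h' (by simpa [← heq] using PySem.List.sorted_pairwise s (fun x => x))
  rw [hpair, Bool.eq_iff_iff, isInOrderA, isInOrderLoop_iff, decide_eq_true_iff]
  rcases s with _ | ⟨a, t⟩
  · simp
  · simp only [List.headD_cons, List.isChain_cons_cons]
    rw [List.isChain_iff_pairwise]
    constructor
    · rintro ⟨-, hp⟩; exact hp
    · intro hp; exact ⟨le_refl a, hp⟩

lemma hasAdj_length (s : List Int) (h : hasAdjRepeatB s = true) : 2 ≤ s.length := by
  rw [hasAdjRepeatB_eq] at h
  rcases s with _ | ⟨a, t⟩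
  · simp at h
  · rcases t with _ | ⟨b, u⟩
    · simp at h
    · simp

lemma step_eq (s : List Int) (acc : Int) :
    innerA s (PySem.List.pyRange 0 ((s.length : Int) - 1) 1) acc =
      (if hasAdjRepeatB s && s == PySem.List.sorted s (fun x => x) false then acc + 1
       else acc) := by
  rw [innerA_eq]
  by_cases hrep : hasAdjRepeatB s = true
  · have hlen : 2 ≤ s.length := hasAdj_length s hrep
    have hne : PySem.List.pyRange 0 ((s.length : Int) - 1) 1 ≠ [] := by
      rw [PySem.List.pyRange_one_cons (by omega : (0 : Int) < (s.length : Int) - 1)]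
      simp
    rw [twoConsA_eq_hasAdj, isInOrderA_eq_sorted]
    by_cases hs : (s == PySem.List.sorted s (fun x => x) false) = true
    · simp [hne, hrep, hs]
    · simp only [Bool.not_eq_true] at hs
      simp [hrep, hs]
  · simp only [Bool.not_eq_true] at hrep
    rw [twoConsA_eq_hasAdj]
    simp [hrep]

-- ===== VERDICT (by name: the statement is the Claim_ definition above) =====
theorem meetRequirements_spec : Claim_equal_meetRequirements := by
  intro lst _
  unfold Spec_meetRequirements meetRequirements meetRequirements_alt
  congr 1
  funext acc s
  exact step_eq s acc
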